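-- pv_equiv track=rewrite | github.com/adiens916/NOTE-algorithm | problems/This_is_coding_test/1_O/4_1_2 시각.py | count_target_num_until_nth_of_clock
-- ===== SOURCE A (Python) =====
-- def count_target_num_until_nth_of_clock(target_num: int, n: int) -> int:
--     basic_count = 0
--
--     for m in range(60):
--         for s in range(60):
--             if str(target_num) in str(m) or str(target_num) in str(s):
--                 basic_count += 1
--
--     count = 0
--
--     for h in range(n + 1):
--         if str(target_num) not in str(h):
--             count += basic_count
--         else:
--             count += 3600
--
--     return count
-- ===== SOURCE B (Python) =====
-- def count_target_num_until_nth_of_clock(target_num: int, n: int) -> int: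
--     t = str(target_num)
--     miss = sum(1 for x in range(60) if t not in str(x))
--     pair_hits = 3600 - miss * miss
--     count = 0
--     for h in range(n + 1):
--         count += 3600 if t in str(h) else pair_hits
--     return count
-- ===== Notes on version B (the rewrite author's own statement) =====
-- stated objective: faster
-- what changed: Replaces A's 3600-iteration nested minute/second loop by a single 60-element complement count (pairs where neither component contains the target = miss^2, so qualifying pairs = 3600 - miss^2), keeping one pass over the hours.
import Mathlib
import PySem

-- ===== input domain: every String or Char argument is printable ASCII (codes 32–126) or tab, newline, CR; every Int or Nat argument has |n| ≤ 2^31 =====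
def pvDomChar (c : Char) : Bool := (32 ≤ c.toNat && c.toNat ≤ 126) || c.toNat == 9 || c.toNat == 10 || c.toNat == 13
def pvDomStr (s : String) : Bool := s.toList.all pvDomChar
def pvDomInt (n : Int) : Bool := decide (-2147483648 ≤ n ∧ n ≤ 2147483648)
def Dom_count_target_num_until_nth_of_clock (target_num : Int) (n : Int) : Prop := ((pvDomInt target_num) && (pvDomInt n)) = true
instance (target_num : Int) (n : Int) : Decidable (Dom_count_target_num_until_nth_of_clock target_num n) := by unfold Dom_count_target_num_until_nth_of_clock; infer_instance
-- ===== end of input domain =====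

-- B replaces A's 3600-iteration minute/second double loop by a 60-element complement
-- count (qualifying pairs = 3600 - miss^2); same value, smaller precomputation.

-- ===== PORT A =====
def count_target_num_until_nth_of_clock (target_num : Int) (n : Int) : Int :=
  let basic_count : Int :=
    (PySem.List.pyRange 0 60 1).foldl (fun bc m =>
      (PySem.List.pyRange 0 60 1).foldl (fun bc s =>
        if PySem.Str.isIn (PySem.Int.toStr target_num) (PySem.Int.toStr m)
            || PySem.Str.isIn (PySem.Int.toStr target_num) (PySem.Int.toStr s)
        then bc + 1 else bc) bc) 0
  (PySem.List.pyRange 0 (n + 1) 1).foldl (fun c h =>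
    if !(PySem.Str.isIn (PySem.Int.toStr target_num) (PySem.Int.toStr h))
    then c + basic_count else c + 3600) 0

-- ===== PORT B =====
def count_target_num_until_nth_of_clock_alt (target_num : Int) (n : Int) : Int :=
  let t := PySem.Int.toStr target_num
  let miss : Int :=
    (PySem.List.pyRange 0 60 1).foldl
      (fun a x => if !(PySem.Str.isIn t (PySem.Int.toStr x)) then a + 1 else a) 0
  let pair_hits : Int := 3600 - miss * miss
  (PySem.List.pyRange 0 (n + 1) 1).foldl
    (fun c h => c + (if PySem.Str.isIn t (PySem.Int.toStr h) then 3600 else pair_hits)) 0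

-- ===== PRECONDITION & SPEC =====
def Spec_count_target_num_until_nth_of_clock (target_num : Int) (n : Int) (out : Int) : Prop := out = count_target_num_until_nth_of_clock_alt target_num n
instance (target_num : Int) (n : Int) (out : Int) : Decidable (Spec_count_target_num_until_nth_of_clock target_num n out) := by unfold Spec_count_target_num_until_nth_of_clock; infer_instance

-- ===== CLAIM (what is proved, stated in full; the proofs are below) =====
def Claim_equal_count_target_num_until_nth_of_clock : Prop := ∀ (target_num : Int) (n : Int), Dom_count_target_num_until_nth_of_clock target_num n → Spec_count_target_num_until_nth_of_clock target_num n (count_target_num_until_nth_of_clock target_num n)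

-- ===== LEMMAS AND PROOFS =====

-- inner second-loop of A: counts L.length if the minute already matches, else countP p L
theorem pvInner (p : Int → Bool) (q : Bool) (L : List Int) (acc : Int) :
    L.foldl (fun a s => if q || p s then a + 1 else a) acc
      = acc + (if q then (L.length : Int) else (L.countP p : Int)) := by
  rw [PySem.List.foldl_if_add_one]
  cases q <;> simp [List.countP_true]

-- A's double loop, in terms of hit/miss counts over the ranges
theorem pvOuter (p : Int → Bool) (L M : List Int) (acc : Int) :
    L.foldl (fun bc m =>
      M.foldl (fun bc s => if p m || p s then bc + 1 else bc) bc) acc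
      = acc + (L.countP p : Int) * (M.length : Int)
          + (L.countP (fun m => !(p m)) : Int) * (M.countP p : Int) := by
  induction L generalizing acc with
  | nil => simp
  | cons m L ih =>
      simp only [List.foldl_cons, List.countP_cons]
      rw [ih, pvInner]
      by_cases hm : p m = true
      · simp [hm]; ring
      · rw [Bool.not_eq_true] at hm; simp [hm]; ring

-- hits + misses over a list = its length
theorem pvCountSplit (p : Int → Bool) (L : List Int) :
    L.countP p + L.countP (fun m => !(p m)) = L.length := by
  induction L with
  | nil => rfl
  | cons a L ih => by_cases h : p a = true <;> simp [h] <;> omega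

-- core: A's precomputed basic_count equals B's 3600 - miss^2
theorem pvBasicEq (p : Int → Bool) :
    (PySem.List.pyRange 0 60 1).foldl (fun bc m =>
      (PySem.List.pyRange 0 60 1).foldl (fun bc s => if p m || p s then bc + 1 else bc) bc) 0
      = 3600 - ((PySem.List.pyRange 0 60 1).countP (fun m => !(p m)) : Int)
              * ((PySem.List.pyRange 0 60 1).countP (fun m => !(p m)) : Int) := by
  rw [pvOuter]
  have hlen : (PySem.List.pyRange 0 60 1).length = 60 := by decide
  have h := pvCountSplit p (PySem.List.pyRange 0 60 1)
  rw [hlen] at h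
  set k := (PySem.List.pyRange 0 60 1).countP p with hk
  set ms := (PySem.List.pyRange 0 60 1).countP (fun m => !(p m)) with hms
  have h' : (k : Int) + (ms : Int) = 60 := by exact_mod_cast h
  rw [hlen]
  push_cast
  linear_combination ((ms : Int) + 60) * h'

theorem count_target_num_until_nth_of_clock_eq (target_num n : Int) :
    count_target_num_until_nth_of_clock target_num n
      = count_target_num_until_nth_of_clock_alt target_num n := by
  unfold count_target_num_until_nth_of_clock count_target_num_until_nth_of_clock_alt
  set p : Int → Bool := fun x => PySem.Str.isIn (PySem.Int.toStr target_num) (PySem.Int.toStr x) with hp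
  have hmiss : (PySem.List.pyRange 0 60 1).foldl
      (fun a x => if !(p x) then a + 1 else a) (0 : Int)
      = ((PySem.List.pyRange 0 60 1).countP (fun m => !(p m)) : Int) := by
    rw [PySem.List.foldl_if_add_one]; simp
  simp only
  rw [pvBasicEq p, ← hmiss]
  set pair_hits : Int := 3600 -
    (PySem.List.pyRange 0 60 1).foldl (fun a x => if !(p x) then a + 1 else a) (0 : Int) *
    (PySem.List.pyRange 0 60 1).foldl (fun a x => if !(p x) then a + 1 else a) (0 : Int)
  have hfun : (fun (c : Int) (h : Int) => if !(p h) then c + pair_hits else c + 3600)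
      = fun (c : Int) (h : Int) => c + (if p h then 3600 else pair_hits) := by
    funext c h
    cases hh : p h <;> simp_all
  rw [hfun]

-- ===== VERDICT (by name: the statement is the Claim_ definition above) =====
theorem count_target_num_until_nth_of_clock_spec : Claim_equal_count_target_num_until_nth_of_clock := by
  intro target_num n _
  unfold Spec_count_target_num_until_nth_of_clock
  exact count_target_num_until_nth_of_clock_eq target_num n
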